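-- pv_equiv track=rewrite | github.com/davxy/polkadot-arkworks-extensions | scripts/process_results.py | pair_benchmarks
-- ===== SOURCE A (Python) =====
-- def pair_benchmarks(benchmarks):
--     """Pair ark_ and sub_ benchmarks by their base name."""
--     pairs = {}
--
--     for name, time in benchmarks.items():
--         if name.startswith('ark_'):
--             base = name[4:]  # Remove 'ark_' prefix
--             if base not in pairs:
--                 pairs[base] = {'ark': None, 'sub': None}
--             pairs[base]['ark'] = time
--         elif name.startswith('sub_'):
--             base = name[4:]  # Remove 'sub_' prefix
--             if base not in pairs:
--                 pairs[base] = {'ark': None, 'sub': None}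
--             pairs[base]['sub'] = time
--
--     return pairs
-- ===== SOURCE B (Python) =====
-- def pair_benchmarks(benchmarks):
--     """Pair ark_ and sub_ benchmarks by their base name."""
--     bases = {name[4:]: None for name in benchmarks
--              if name.startswith('ark_') or name.startswith('sub_')}
--     return {base: {'ark': benchmarks.get('ark_' + base),
--                    'sub': benchmarks.get('sub_' + base)}
--             for base in bases}
-- ===== Notes on version B (the rewrite author's own statement) =====
-- stated objective: alternative
-- what changed: Replaces the single-pass conditional dict-of-dicts accumulation with a two-phase shape: one comprehension collecting the deduplicated base names in first-appearance order, then a dict comprehension that builds each pair by direct benchmarks.get lookups.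
import Mathlib
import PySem

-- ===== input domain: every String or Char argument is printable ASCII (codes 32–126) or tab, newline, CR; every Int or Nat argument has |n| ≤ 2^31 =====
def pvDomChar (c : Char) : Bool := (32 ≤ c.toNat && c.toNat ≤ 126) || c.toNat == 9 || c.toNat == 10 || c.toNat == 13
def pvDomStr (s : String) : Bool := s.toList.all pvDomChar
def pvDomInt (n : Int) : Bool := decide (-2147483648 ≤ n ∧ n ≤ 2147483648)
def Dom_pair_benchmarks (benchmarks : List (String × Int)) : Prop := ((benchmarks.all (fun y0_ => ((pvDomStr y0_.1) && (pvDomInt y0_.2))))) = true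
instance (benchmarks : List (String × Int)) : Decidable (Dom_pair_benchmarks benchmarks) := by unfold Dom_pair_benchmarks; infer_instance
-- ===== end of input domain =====

-- B replaces A's single-pass conditional dict-of-dicts accumulation by two phases: collect the
-- deduplicated base names, then build each pair by direct .get lookups (alternative decomposition).

-- ===== PORT A =====
-- {'ark': None, 'sub': None}
def pbNewEntry : PySem.Dict String (Option Int) := PySem.Dict.mk [("ark", none), ("sub", none)]

-- body of A's for-loop
def pbStep (pairs : PySem.Dict String (PySem.Dict String (Option Int)))
    (p : String × Int) : PySem.Dict String (PySem.Dict String (Option Int)) :=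
  if PySem.Str.startswith p.1 "ark_" then
    let base := PySem.Str.slice p.1 (some 4) none
    let pairs := if pairs.contains base then pairs else pairs.insert base pbNewEntry
    pairs.modify base PySem.Dict.empty (fun d => d.insert "ark" (some p.2))
  else if PySem.Str.startswith p.1 "sub_" then
    let base := PySem.Str.slice p.1 (some 4) none
    let pairs := if pairs.contains base then pairs else pairs.insert base pbNewEntry
    pairs.modify base PySem.Dict.empty (fun d => d.insert "sub" (some p.2))
  else pairs

def pair_benchmarks (benchmarks : List (String × Int)) : List (String × List (String × Option Int)) :=
  ((benchmarks.foldl pbStep PySem.Dict.empty).items).map (fun q => (q.1, q.2.items))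

-- ===== PORT B =====
-- body of B's first comprehension (ordered set of base names, as a dict used as ordered set)
def pbAltStep (d : PySem.Dict String (Option Int)) (p : String × Int) : PySem.Dict String (Option Int) :=
  if PySem.Str.startswith p.1 "ark_" || PySem.Str.startswith p.1 "sub_" then
    d.insert (PySem.Str.slice p.1 (some 4) none) none
  else d

def pair_benchmarks_alt (benchmarks : List (String × Int)) : List (String × List (String × Option Int)) :=
  let bm := PySem.Dict.mk benchmarks
  let bases := benchmarks.foldl pbAltStep PySem.Dict.empty
  bases.keys.map (fun base =>
    (base, [("ark", bm.get? ("ark_" ++ base)), ("sub", bm.get? ("sub_" ++ base))]))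

-- ===== PRECONDITION & SPEC =====
-- Pre_ requires pairwise-distinct keys: A's parameter is a Python dict, which cannot hold duplicate
-- keys; only the association-list encoding admits them, and there the encoding means nothing.
def Pre_pair_benchmarks (benchmarks : List (String × Int)) : Prop :=
  (benchmarks.map Prod.fst).Nodup
instance (benchmarks : List (String × Int)) : Decidable (Pre_pair_benchmarks benchmarks) := by unfold Pre_pair_benchmarks; infer_instance

def pvWitness_pair_benchmarks : (List (String × Int)) := [("ark_msm", 3), ("sub_msm", 5), ("other", 1)]

def Spec_pair_benchmarks (benchmarks : List (String × Int)) (out : List (String × List (String × Option Int))) : Prop := out = pair_benchmarks_alt benchmarks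
instance (benchmarks : List (String × Int)) (out : List (String × List (String × Option Int))) : Decidable (Spec_pair_benchmarks benchmarks out) := by unfold Spec_pair_benchmarks; infer_instance

-- ===== CLAIM (what is proved, stated in full; the proofs are below) =====
def Claim_equal_pair_benchmarks : Prop := ∀ (benchmarks : List (String × Int)), Dom_pair_benchmarks benchmarks → Pre_pair_benchmarks benchmarks → Spec_pair_benchmarks benchmarks (pair_benchmarks benchmarks)

-- ===== LEMMAS AND PROOFS =====

-- last-occurrence lookup of key k in the association list l
def lookL (l : List (String × Int)) (k : String) : Option Int :=
  (l.reverse.find? (fun p => p.1 == k)).map (·.2)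

def Fd (l : List (String × Int)) : PySem.Dict String (PySem.Dict String (Option Int)) :=
  l.foldl pbStep PySem.Dict.empty

def Gd (l : List (String × Int)) : PySem.Dict String (Option Int) :=
  l.foldl pbAltStep PySem.Dict.empty

lemma lookL_append (l : List (String × Int)) (x : String × Int) (k : String) :
    lookL (l ++ [x]) k = if x.1 = k then some x.2 else lookL l k := by
  simp [lookL, List.find?_cons]
  split_ifs with h
  · simp [h]
  · have hb : (x.1 == k) = false := by simp [beq_eq_false_iff_ne, h]
    simp [hb]

lemma startswith_decomp (s : String) (p : String)
    (h : PySem.Str.startswith s p = true) :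
    p ++ PySem.Str.slice s (some (p.length : Int)) none = s := by
  have h2 : p.toList <+: s.toList := by
    simpa [PySem.Chars.startswith_iff] using h
  obtain ⟨t, ht⟩ := h2
  have hsl : (PySem.Str.slice s (some (p.length : Int)) none).toList = s.toList.drop p.length := by
    simp [PySem.Str.toList_slice, PySem.List.slice_from_natCast]
  have : (p ++ PySem.Str.slice s (some (p.length : Int)) none).toList = s.toList := by
    rw [String.toList_append, hsl, ← ht]
    simp
  exact String.toList_injective this

lemma ne_of_not_startswith (s b p : String)
    (h : ¬ PySem.Str.startswith s p = true) : s ≠ p ++ b := by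
  intro he
  apply h
  have h2 : PySem.Chars.startswith s.toList p.toList = true := by
    rw [PySem.Chars.startswith_iff, he]
    simp [String.toList_append]
  simpa using h2

lemma ark_ne_sub (b b' : String) : ("ark_" ++ b : String) ≠ "sub_" ++ b' := by
  intro he
  have := congrArg String.toList he
  simp [String.toList_append] at this

lemma append_cancel_str (p b b' : String) (h : p ++ b = p ++ b') : b = b' := by
  have := congrArg String.toList h
  simp [String.toList_append] at this
  exact String.toList_injective this

lemma pb_inv (l : List (String × Int)) :
    (Fd l).keys = (Gd l).keys
    ∧ (Fd l).keys.Nodup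
    ∧ (∀ b, b ∈ (Fd l).keys →
        ((Fd l).getD b PySem.Dict.empty).keys = ["ark", "sub"]
        ∧ ((Fd l).getD b PySem.Dict.empty).getD "ark" none = lookL l ("ark_" ++ b)
        ∧ ((Fd l).getD b PySem.Dict.empty).getD "sub" none = lookL l ("sub_" ++ b))
    ∧ (∀ b, b ∉ (Fd l).keys → lookL l ("ark_" ++ b) = none ∧ lookL l ("sub_" ++ b) = none) := by
  induction l using List.reverseRecOn with
  | nil => simp [Fd, Gd, lookL]
  | append_singleton l x ih =>
    obtain ⟨hk, hnd, hmem, hnone⟩ := ih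
    by_cases hA : PySem.Str.startswith x.1 "ark_" = true
    · -- ark_ branch of A's loop body
      have hx : ("ark_" : String) ++ PySem.Str.slice x.1 (some 4) none = x.1 := by
        have := startswith_decomp x.1 "ark_" hA
        norm_num at this
        exact this
      set b0 := PySem.Str.slice x.1 (some 4) none with hb0
      have hF : Fd (l ++ [x]) =
          ((if (Fd l).contains b0 then Fd l else (Fd l).insert b0 pbNewEntry).modify b0
            PySem.Dict.empty (fun d => d.insert "ark" (some x.2))) := by
        simp only [Fd, List.foldl_append, List.foldl_cons, List.foldl_nil, pbStep]
        rw [if_pos hA]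
      have hG : Gd (l ++ [x]) = (Gd l).insert b0 none := by
        simp only [Gd, List.foldl_append, List.foldl_cons, List.foldl_nil, pbAltStep]
        rw [if_pos (by rw [Bool.or_eq_true]; exact Or.inl hA)]
      have hlookA : ∀ b : String, lookL (l ++ [x]) ("ark_" ++ b) =
          if b = b0 then some x.2 else lookL l ("ark_" ++ b) := by
        intro b
        rw [lookL_append]
        by_cases hb : b = b0
        · rw [if_pos (by rw [hb]; exact hx.symm), if_pos hb]
        · rw [if_neg (fun he => hb ((append_cancel_str "ark_" b0 b (hx.trans he)).symm)),
            if_neg hb]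
      have hlookS : ∀ b : String, lookL (l ++ [x]) ("sub_" ++ b) = lookL l ("sub_" ++ b) := by
        intro b
        rw [lookL_append, if_neg (fun he => ark_ne_sub b0 b (hx.trans he))]
      rw [hF, hG]
      by_cases hc : (Fd l).contains b0 = true
      · -- base already present
        have hcmem : b0 ∈ (Fd l).keys := (PySem.Dict.contains_iff_mem_keys _ _).1 hc
        have hcG : (Gd l).contains b0 = true := by
          rw [PySem.Dict.contains_iff_mem_keys, ← hk]; exact hcmem
        rw [if_pos hc]
        have hkeys : (((Fd l).modify b0 PySem.Dict.empty
            (fun d => d.insert "ark" (some x.2)))).keys = (Fd l).keys := by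
          rw [PySem.Dict.keys_modify, PySem.Dict.keys_insert_of_contains _ _ hc]
        refine ⟨?_, ?_, ?_, ?_⟩
        · rw [hkeys, PySem.Dict.keys_insert_of_contains _ _ hcG, hk]
        · rw [hkeys]; exact hnd
        · intro b hb
          rw [hkeys] at hb
          rw [PySem.Dict.getD_modify]
          by_cases hbb : b = b0
          · rw [hbb] at hb ⊢
            rw [if_pos rfl]
            obtain ⟨hik, hia, his⟩ := hmem b0 hb
            have hcin : ((Fd l).getD b0 PySem.Dict.empty).contains "ark" = true := by
              rw [PySem.Dict.contains_iff_mem_keys, hik]; simp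
            refine ⟨?_, ?_, ?_⟩
            · rw [PySem.Dict.keys_insert_of_contains _ _ hcin, hik]
            · rw [PySem.Dict.getD_insert_self, hlookA, if_pos rfl]
            · rw [PySem.Dict.getD_insert_of_ne _ _ _ (by decide), his, hlookS]
          · rw [if_neg hbb, hlookS]
            obtain ⟨hik, hia, his⟩ := hmem b hb
            exact ⟨hik, by rw [hia, hlookA, if_neg hbb], his⟩
        · intro b hb
          rw [hkeys] at hb
          have hbb : b ≠ b0 := fun he => hb (he ▸ hcmem)
          rw [hlookA, if_neg hbb, hlookS]
          exact hnone b hb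
      · -- fresh base
        have hc' : (Fd l).contains b0 = false := by
          cases h : (Fd l).contains b0 <;> simp_all
        have hcmem : b0 ∉ (Fd l).keys := by
          intro h; exact hc ((PySem.Dict.contains_iff_mem_keys _ _).2 h)
        have hcG : (Gd l).contains b0 = false := by
          cases h : (Gd l).contains b0 with
          | true => exact absurd (hk ▸ (PySem.Dict.contains_iff_mem_keys _ _).1 h) hcmem
          | false => rfl
        rw [if_neg (by simp [hc'])]
        have hcins : ((Fd l).insert b0 pbNewEntry).contains b0 = true := by
          simp [PySem.Dict.contains_insert_self]
        have hkeys : ((((Fd l).insert b0 pbNewEntry)).modify b0 PySem.Dict.empty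
            (fun d => d.insert "ark" (some x.2))).keys = (Fd l).keys ++ [b0] := by
          rw [PySem.Dict.keys_modify, PySem.Dict.keys_insert_of_contains _ _ hcins,
            PySem.Dict.keys_insert_of_not_contains _ _ hc']
        refine ⟨?_, ?_, ?_, ?_⟩
        · rw [hkeys, PySem.Dict.keys_insert_of_not_contains _ _ hcG, hk]
        · rw [hkeys]
          simp [List.nodup_append, hnd]
          intro a ha he
          exact hcmem (he ▸ ha)
        · intro b hb
          rw [hkeys] at hb
          rw [PySem.Dict.getD_modify]
          by_cases hbb : b = b0
          · rw [hbb] at hb ⊢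
            rw [if_pos rfl, PySem.Dict.getD_insert_self]
            refine ⟨?_, ?_, ?_⟩
            · rw [PySem.Dict.keys_insert_of_contains _ _ (show pbNewEntry.contains "ark" = true by decide)]
              decide
            · rw [PySem.Dict.getD_insert_self, hlookA, if_pos rfl]
            · rw [PySem.Dict.getD_insert_of_ne _ _ _ (by decide), hlookS,
                (hnone b0 hcmem).2]
              decide
          · rw [if_neg hbb, PySem.Dict.getD_insert_of_ne _ _ _ hbb, hlookS]
            have hbmem : b ∈ (Fd l).keys := by
              rcases List.mem_append.1 hb with h | h
              · exact h
              · exact absurd (List.mem_singleton.1 h) hbb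
            obtain ⟨hik, hia, his⟩ := hmem b hbmem
            exact ⟨hik, by rw [hia, hlookA, if_neg hbb], his⟩
        · intro b hb
          rw [hkeys] at hb
          simp [List.mem_append] at hb
          obtain ⟨hb1, hb2⟩ := hb
          rw [hlookA, if_neg hb2, hlookS]
          exact hnone b hb1
    · by_cases hS : PySem.Str.startswith x.1 "sub_" = true
      · -- sub_ branch of A's loop body
        have hx : ("sub_" : String) ++ PySem.Str.slice x.1 (some 4) none = x.1 := by
          have := startswith_decomp x.1 "sub_" hS
          norm_num at this
          exact this
        set b0 := PySem.Str.slice x.1 (some 4) none with hb0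
        have hF : Fd (l ++ [x]) =
            ((if (Fd l).contains b0 then Fd l else (Fd l).insert b0 pbNewEntry).modify b0
              PySem.Dict.empty (fun d => d.insert "sub" (some x.2))) := by
          simp only [Fd, List.foldl_append, List.foldl_cons, List.foldl_nil, pbStep]
          rw [if_neg hA, if_pos hS]
        have hG : Gd (l ++ [x]) = (Gd l).insert b0 none := by
          simp only [Gd, List.foldl_append, List.foldl_cons, List.foldl_nil, pbAltStep]
          rw [if_pos (by rw [Bool.or_eq_true]; exact Or.inr hS)]
        have hlookS : ∀ b : String, lookL (l ++ [x]) ("sub_" ++ b) =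
            if b = b0 then some x.2 else lookL l ("sub_" ++ b) := by
          intro b
          rw [lookL_append]
          by_cases hb : b = b0
          · rw [if_pos (by rw [hb]; exact hx.symm), if_pos hb]
          · rw [if_neg (fun he => hb ((append_cancel_str "sub_" b0 b (hx.trans he)).symm)),
              if_neg hb]
        have hlookA : ∀ b : String, lookL (l ++ [x]) ("ark_" ++ b) = lookL l ("ark_" ++ b) := by
          intro b
          rw [lookL_append, if_neg (fun he => ark_ne_sub b b0 (he.symm.trans hx.symm))]
        rw [hF, hG]
        by_cases hc : (Fd l).contains b0 = true
        · have hcmem : b0 ∈ (Fd l).keys := (PySem.Dict.contains_iff_mem_keys _ _).1 hc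
          have hcG : (Gd l).contains b0 = true := by
            rw [PySem.Dict.contains_iff_mem_keys, ← hk]; exact hcmem
          rw [if_pos hc]
          have hkeys : (((Fd l).modify b0 PySem.Dict.empty
              (fun d => d.insert "sub" (some x.2)))).keys = (Fd l).keys := by
            rw [PySem.Dict.keys_modify, PySem.Dict.keys_insert_of_contains _ _ hc]
          refine ⟨?_, ?_, ?_, ?_⟩
          · rw [hkeys, PySem.Dict.keys_insert_of_contains _ _ hcG, hk]
          · rw [hkeys]; exact hnd
          · intro b hb
            rw [hkeys] at hb
            rw [PySem.Dict.getD_modify]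
            by_cases hbb : b = b0
            · rw [hbb] at hb ⊢
              rw [if_pos rfl]
              obtain ⟨hik, hia, his⟩ := hmem b0 hb
              have hcin : ((Fd l).getD b0 PySem.Dict.empty).contains "sub" = true := by
                rw [PySem.Dict.contains_iff_mem_keys, hik]; simp
              refine ⟨?_, ?_, ?_⟩
              · rw [PySem.Dict.keys_insert_of_contains _ _ hcin, hik]
              · rw [PySem.Dict.getD_insert_of_ne _ _ _ (by decide), hia, hlookA]
              · rw [PySem.Dict.getD_insert_self, hlookS, if_pos rfl]
            · rw [if_neg hbb, hlookA]
              obtain ⟨hik, hia, his⟩ := hmem b hb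
              exact ⟨hik, hia, by rw [his, hlookS, if_neg hbb]⟩
          · intro b hb
            rw [hkeys] at hb
            have hbb : b ≠ b0 := fun he => hb (he ▸ hcmem)
            rw [hlookA, hlookS, if_neg hbb]
            exact hnone b hb
        · have hc' : (Fd l).contains b0 = false := by
            cases h : (Fd l).contains b0 <;> simp_all
          have hcmem : b0 ∉ (Fd l).keys := by
            intro h; exact hc ((PySem.Dict.contains_iff_mem_keys _ _).2 h)
          have hcG : (Gd l).contains b0 = false := by
            cases h : (Gd l).contains b0 with
            | true => exact absurd (hk ▸ (PySem.Dict.contains_iff_mem_keys _ _).1 h) hcmem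
            | false => rfl
          rw [if_neg (by simp [hc'])]
          have hcins : ((Fd l).insert b0 pbNewEntry).contains b0 = true := by
            simp [PySem.Dict.contains_insert_self]
          have hkeys : ((((Fd l).insert b0 pbNewEntry)).modify b0 PySem.Dict.empty
              (fun d => d.insert "sub" (some x.2))).keys = (Fd l).keys ++ [b0] := by
            rw [PySem.Dict.keys_modify, PySem.Dict.keys_insert_of_contains _ _ hcins,
              PySem.Dict.keys_insert_of_not_contains _ _ hc']
          refine ⟨?_, ?_, ?_, ?_⟩
          · rw [hkeys, PySem.Dict.keys_insert_of_not_contains _ _ hcG, hk]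
          · rw [hkeys]
            simp [List.nodup_append, hnd]
            intro a ha he
            exact hcmem (he ▸ ha)
          · intro b hb
            rw [hkeys] at hb
            rw [PySem.Dict.getD_modify]
            by_cases hbb : b = b0
            · rw [hbb] at hb ⊢
              rw [if_pos rfl, PySem.Dict.getD_insert_self]
              refine ⟨?_, ?_, ?_⟩
              · rw [PySem.Dict.keys_insert_of_contains _ _ (show pbNewEntry.contains "sub" = true by decide)]
                decide
              · rw [PySem.Dict.getD_insert_of_ne _ _ _ (by decide), hlookA,
                  (hnone b0 hcmem).1]
                decide
              · rw [PySem.Dict.getD_insert_self, hlookS, if_pos rfl]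
            · rw [if_neg hbb, PySem.Dict.getD_insert_of_ne _ _ _ hbb, hlookA]
              have hbmem : b ∈ (Fd l).keys := by
                rcases List.mem_append.1 hb with h | h
                · exact h
                · exact absurd (List.mem_singleton.1 h) hbb
              obtain ⟨hik, hia, his⟩ := hmem b hbmem
              exact ⟨hik, hia, by rw [his, hlookS, if_neg hbb]⟩
          · intro b hb
            rw [hkeys] at hb
            simp [List.mem_append] at hb
            obtain ⟨hb1, hb2⟩ := hb
            rw [hlookA, hlookS, if_neg hb2]
            exact hnone b hb1
      · -- name with neither prefix: nothing changes
        have hF : Fd (l ++ [x]) = Fd l := by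
          simp only [Fd, List.foldl_append, List.foldl_cons, List.foldl_nil, pbStep]
          rw [if_neg hA, if_neg hS]
        have hG : Gd (l ++ [x]) = Gd l := by
          simp only [Gd, List.foldl_append, List.foldl_nil, List.foldl_cons, pbAltStep]
          rw [if_neg (by simp only [Bool.or_eq_true, not_or]; exact ⟨hA, hS⟩)]
        have hlookA : ∀ b : String, lookL (l ++ [x]) ("ark_" ++ b) = lookL l ("ark_" ++ b) := by
          intro b
          rw [lookL_append, if_neg (ne_of_not_startswith x.1 b "ark_" hA)]
        have hlookS : ∀ b : String, lookL (l ++ [x]) ("sub_" ++ b) = lookL l ("sub_" ++ b) := by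
          intro b
          rw [lookL_append, if_neg (ne_of_not_startswith x.1 b "sub_" hS)]
        rw [hF, hG]
        refine ⟨hk, hnd, ?_, ?_⟩
        · intro b hb
          obtain ⟨hik, hia, his⟩ := hmem b hb
          exact ⟨hik, by rw [hia, hlookA], by rw [his, hlookS]⟩
        · intro b hb
          rw [hlookA, hlookS]
          exact hnone b hb

lemma get?_eq_lookL (l : List (String × Int)) (h : (l.map Prod.fst).Nodup) (k : String) :
    (PySem.Dict.mk l).get? k = lookL l k := by
  induction l with
  | nil => simp [lookL, PySem.Dict.get?]
  | cons p rest ih =>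
    simp only [List.map_cons, List.nodup_cons] at h
    obtain ⟨hp, hrest⟩ := h
    rw [PySem.Dict.get?_mk_cons]
    by_cases hpk : p.1 = k
    · rw [if_pos (by simp [hpk])]
      have hnone : rest.reverse.find? (fun q => q.1 == k) = none := by
        rw [List.find?_eq_none]
        intro q hq
        simp only [beq_iff_eq]
        intro he
        exact hp (by rw [hpk, ← he]; exact List.mem_map_of_mem (List.mem_reverse.1 hq))
      simp [lookL, List.reverse_cons, List.find?_append, hnone, hpk]
    · rw [if_neg (by simp [hpk])]
      have hlast : List.find? (fun q => q.1 == k) [p] = none := by simp [hpk]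
      rw [ih hrest]
      simp [lookL, List.reverse_cons, List.find?_append, hlast]

-- ===== VERDICT (by name: the statement is the Claim_ definition above) =====
theorem pair_benchmarks_spec : Claim_equal_pair_benchmarks := by
  intro l _hdom hpre
  obtain ⟨hk, hnd, hmem, _⟩ := pb_inv l
  unfold Spec_pair_benchmarks pair_benchmarks pair_benchmarks_alt
  show ((Fd l).items).map (fun q => (q.1, q.2.items)) =
    (Gd l).keys.map (fun base =>
      (base, [("ark", (PySem.Dict.mk l).get? ("ark_" ++ base)),
              ("sub", (PySem.Dict.mk l).get? ("sub_" ++ base))]))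
  rw [PySem.Dict.items_eq_map_keys _ hnd PySem.Dict.empty, List.map_map, ← hk]
  apply List.map_congr_left
  intro b hb
  obtain ⟨hik, hia, his⟩ := hmem b hb
  have hinnd : ((Fd l).getD b PySem.Dict.empty).keys.Nodup := by rw [hik]; decide
  simp only [Function.comp]
  rw [PySem.Dict.items_eq_map_keys _ hinnd none, hik]
  simp only [List.map_cons, List.map_nil]
  rw [hia, his, get?_eq_lookL l hpre, get?_eq_lookL l hpre]
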